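-- pv_equiv track=rewrite | github.com/bozakp/tab-monitor | count_open_tabs.py | _sum_change
-- ===== SOURCE A (Python) =====
-- def _sum_change(ls):
--     count = 0
--     for l in ls:
--         if l[0] == '-':
--             count -= 1
--         elif l[0] == '+':
--             count += 1
--     return count
-- ===== SOURCE B (Python) =====
-- def _sum_change(ls):
--     firsts = [l[0] for l in ls]
--     return firsts.count('+') - firsts.count('-')
-- ===== Notes on version B (the rewrite author's own statement) =====
-- stated objective: idiomatic
-- what changed: B replaces the branching running-sum loop with one pass collecting first characters and two list.count scans, returning count('+') - count('-').
import Mathlib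
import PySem

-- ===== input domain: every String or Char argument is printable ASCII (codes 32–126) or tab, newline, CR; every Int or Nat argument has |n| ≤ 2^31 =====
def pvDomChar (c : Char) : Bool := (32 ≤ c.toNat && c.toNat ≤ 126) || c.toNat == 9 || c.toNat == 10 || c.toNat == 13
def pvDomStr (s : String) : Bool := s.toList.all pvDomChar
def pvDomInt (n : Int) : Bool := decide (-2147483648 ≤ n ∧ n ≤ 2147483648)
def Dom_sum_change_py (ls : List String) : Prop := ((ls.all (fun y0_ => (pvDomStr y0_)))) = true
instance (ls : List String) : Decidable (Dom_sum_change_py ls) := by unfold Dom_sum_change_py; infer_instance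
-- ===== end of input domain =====

-- B collects the first characters once and returns count('+') - count('-') instead of A's branching running-sum loop (idiomatic; same cost).


-- ===== PORT A =====
def sum_change_py (ls : List String) : Int :=
  ls.foldl (fun count l =>
    if PySem.Str.pyGet? l 0 = some '-' then count - 1
    else if PySem.Str.pyGet? l 0 = some '+' then count + 1
    else count) 0

-- ===== PORT B =====
def sum_change_py_alt (ls : List String) : Int :=
  let firsts := ls.map (fun l => PySem.Str.pyGet? l 0)
  (PySem.List.count firsts (some '+') : Int) - (PySem.List.count firsts (some '-') : Int)

-- ===== PRECONDITION & SPEC =====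
-- Pre_ excludes lists containing an empty string, on which both A and B raise IndexError at l[0].
def Pre_sum_change_py (ls : List String) : Prop := ∀ l ∈ ls, l.toList ≠ []
instance (ls : List String) : Decidable (Pre_sum_change_py ls) := by unfold Pre_sum_change_py; infer_instance
def pvWitness_sum_change_py : List String := ["+tab", "-tab", "x"]
def Spec_sum_change_py (ls : List String) (out : Int) : Prop := out = sum_change_py_alt ls
instance (ls : List String) (out : Int) : Decidable (Spec_sum_change_py ls out) := by unfold Spec_sum_change_py; infer_instance

-- ===== CLAIM (what is proved, stated in full; the proofs are below) =====
def Claim_equal_sum_change_py : Prop := ∀ (ls : List String), Dom_sum_change_py ls → Pre_sum_change_py ls → Spec_sum_change_py ls (sum_change_py ls)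

-- ===== LEMMAS AND PROOFS =====
theorem sum_change_key (ls : List String) (c : Int) :
    ls.foldl (fun count l =>
      if PySem.Str.pyGet? l 0 = some '-' then count - 1
      else if PySem.Str.pyGet? l 0 = some '+' then count + 1
      else count) c
    = c + sum_change_py_alt ls := by
  induction ls generalizing c with
  | nil => simp [sum_change_py_alt, PySem.List.count]
  | cons h t ih =>
    simp only [List.foldl_cons, ih, sum_change_py_alt, List.map_cons, PySem.List.count,
      List.count_cons]
    split_ifs with h1 h2 <;> simp_all <;> ring

-- ===== VERDICT (by name: the statement is the Claim_ definition above) =====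
theorem sum_change_py_spec : Claim_equal_sum_change_py := by
  intro ls _ _
  unfold Spec_sum_change_py sum_change_py
  rw [sum_change_key]
  ring
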